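-- pv_equiv track=rewrite | github.com/KianaRostamipour/Computational-chemistry | atp/concate.py | extract_atomtypes
-- ===== SOURCE A (Python) =====
-- def extract_atomtypes(input_file_path, lines):
--     atomtypes_lines = []
--     found_atomtypes = False
--     for line in lines:
--         if line.strip() == '[ atomtypes ]':
--             found_atomtypes = True
--         elif line.strip() == '[ moleculetype ]':
--             break
--         elif found_atomtypes and line.strip():
--             atomtypes_lines.append(line)
--     return atomtypes_lines
-- ===== SOURCE B (Python) =====
-- def extract_atomtypes(input_file_path, lines):
--     stop = len(lines)
--     for i, l in enumerate(lines):
--         if l.strip() == '[ moleculetype ]':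
--             stop = i
--             break
--     start = None
--     for i in range(stop):
--         if lines[i].strip() == '[ atomtypes ]':
--             start = i
--             break
--     if start is None:
--         return []
--     return [l for l in lines[start + 1:stop]
--             if l.strip() and l.strip() != '[ atomtypes ]']
-- ===== Notes on version B (the rewrite author's own statement) =====
-- stated objective: alternative
-- what changed: Replaces the single stateful flag-toggle accumulation loop by a two-phase boundary search: locate the '[ moleculetype ]' stop index and the '[ atomtypes ]' start index, then filter the slice between them.
import Mathlib
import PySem

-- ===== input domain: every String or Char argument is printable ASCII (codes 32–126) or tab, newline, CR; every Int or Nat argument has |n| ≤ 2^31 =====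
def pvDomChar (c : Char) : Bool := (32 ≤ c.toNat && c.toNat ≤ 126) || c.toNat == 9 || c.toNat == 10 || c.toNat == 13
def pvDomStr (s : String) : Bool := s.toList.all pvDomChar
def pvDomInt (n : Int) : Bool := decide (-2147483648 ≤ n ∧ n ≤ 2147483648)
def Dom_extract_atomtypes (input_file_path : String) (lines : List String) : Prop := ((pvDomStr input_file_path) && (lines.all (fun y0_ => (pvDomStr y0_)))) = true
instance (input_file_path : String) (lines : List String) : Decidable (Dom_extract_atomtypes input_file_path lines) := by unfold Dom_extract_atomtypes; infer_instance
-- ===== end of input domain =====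

-- B replaces A's single flag-toggle accumulation loop by a two-phase boundary search
-- (find stop = first '[ moleculetype ]', start = first '[ atomtypes ]' before it, filter the slice);
-- objective: alternative decomposition, same cost. Return values proved equal on all inputs.

-- ===== PORT A =====
-- A's loop: flag `found`, break on '[ moleculetype ]', append non-blank lines once found.
def pvLoopA (lines : List String) (found : Bool) : List String :=
  match lines with
  | [] => []
  | l :: ls =>
    if PySem.Str.strip l == "[ atomtypes ]" then pvLoopA ls true
    else if PySem.Str.strip l == "[ moleculetype ]" then []
    else if found && !(PySem.Str.strip l == "") then l :: pvLoopA ls found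
    else pvLoopA ls found

def extract_atomtypes (input_file_path : String) (lines : List String) : List String :=
  pvLoopA lines false

-- ===== PORT B =====
def extract_atomtypes_alt (input_file_path : String) (lines : List String) : List String :=
  let stop := (lines.findIdx? (fun l => PySem.Str.strip l == "[ moleculetype ]")).getD lines.length
  match (lines.take stop).findIdx? (fun l => PySem.Str.strip l == "[ atomtypes ]") with
  | none => []
  | some start =>
      ((lines.take stop).drop (start + 1)).filter
        (fun l => !(PySem.Str.strip l == "") && !(PySem.Str.strip l == "[ atomtypes ]"))

-- ===== PRECONDITION & SPEC =====
def Spec_extract_atomtypes (input_file_path : String) (lines : List String) (out : List String) : Prop := out = extract_atomtypes_alt input_file_path lines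
instance (input_file_path : String) (lines : List String) (out : List String) : Decidable (Spec_extract_atomtypes input_file_path lines out) := by unfold Spec_extract_atomtypes; infer_instance

-- ===== CLAIM (what is proved, stated in full; the proofs are below) =====
def Claim_equal_extract_atomtypes : Prop := ∀ (input_file_path : String) (lines : List String), Dom_extract_atomtypes input_file_path lines → Spec_extract_atomtypes input_file_path lines (extract_atomtypes input_file_path lines)

-- ===== LEMMAS AND PROOFS =====

def pvAtom (l : String) : Bool := PySem.Str.strip l == "[ atomtypes ]"
def pvMol (l : String) : Bool := PySem.Str.strip l == "[ moleculetype ]"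
def pvKeep (l : String) : Bool := !(PySem.Str.strip l == "") && !(PySem.Str.strip l == "[ atomtypes ]")

-- index of the first '[ moleculetype ]' line (length if none)
def pvStop (ls : List String) : Nat := (ls.findIdx? pvMol).getD ls.length

-- B's body, with the let-bound stop named: definitionally equal to the port of B
def pvAltCore (ls : List String) : List String :=
  match (ls.take (pvStop ls)).findIdx? pvAtom with
  | none => []
  | some start => ((ls.take (pvStop ls)).drop (start + 1)).filter pvKeep

lemma alt_def (p : String) (ls : List String) : extract_atomtypes_alt p ls = pvAltCore ls := rfl

lemma fi_pos {p : String → Bool} {l : String} (ls : List String) (h : p l = true) :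
    (l :: ls).findIdx? p = some 0 := by
  simp [List.findIdx?_cons, h]

lemma fi_neg {p : String → Bool} {l : String} (ls : List String) (h : p l = false) :
    (l :: ls).findIdx? p = (ls.findIdx? p).map (· + 1) := by
  simp only [List.findIdx?_cons, h, Bool.false_eq_true, if_false]

lemma pvStop_cons_mol {l : String} (ls : List String) (hm : pvMol l = true) :
    pvStop (l :: ls) = 0 := by
  simp only [pvStop, fi_pos ls hm, Option.getD_some]

lemma pvStop_cons_not {l : String} (ls : List String) (hm : pvMol l = false) :
    pvStop (l :: ls) = pvStop ls + 1 := by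
  simp only [pvStop, fi_neg ls hm, List.length_cons]
  cases ls.findIdx? pvMol <;> simp

lemma core_cons_mol {l : String} (ls : List String) (hm : pvMol l = true) :
    pvAltCore (l :: ls) = [] := by
  simp only [pvAltCore, pvStop_cons_mol ls hm, List.take_zero, List.findIdx?_nil]

lemma core_cons_atom {l : String} (ls : List String) (ha : pvAtom l = true) (hm : pvMol l = false) :
    pvAltCore (l :: ls) = (ls.take (pvStop ls)).filter pvKeep := by
  simp only [pvAltCore, pvStop_cons_not ls hm, List.take_succ_cons, fi_pos _ ha,
    List.drop_succ_cons, List.drop_zero]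

lemma core_cons_other {l : String} (ls : List String) (ha : pvAtom l = false) (hm : pvMol l = false) :
    pvAltCore (l :: ls) = pvAltCore ls := by
  simp only [pvAltCore, pvStop_cons_not ls hm, List.take_succ_cons, fi_neg _ ha]
  cases (ls.take (pvStop ls)).findIdx? pvAtom with
  | none => simp
  | some s => simp [List.drop_succ_cons]

-- once the flag is set, A's loop is the filtered prefix before the first '[ moleculetype ]'
lemma pvLoopA_true (ls : List String) :
    pvLoopA ls true = (ls.take (pvStop ls)).filter pvKeep := by
  induction ls with
  | nil => simp [pvLoopA, pvStop]
  | cons l ls ih =>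
    by_cases hm : pvMol l = true
    · have h := eq_of_beq hm
      simp [pvLoopA, h, pvStop_cons_mol ls hm]
    · have hm' : pvMol l = false := eq_false_of_ne_true hm
      have hm2 : PySem.Str.strip l ≠ "[ moleculetype ]" := by simpa [pvMol] using hm'
      rw [pvStop_cons_not ls hm', List.take_succ_cons]
      by_cases ha : (PySem.Str.strip l == "[ atomtypes ]") = true
      · simp [pvLoopA, eq_of_beq ha, ih, pvKeep]
      · have ha2 : PySem.Str.strip l ≠ "[ atomtypes ]" := by simpa using ha
        by_cases he : (PySem.Str.strip l == "") = true
        · simp [pvLoopA, eq_of_beq he, ih, pvKeep]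
        · have he2 : PySem.Str.strip l ≠ "" := by simpa using he
          simp [pvLoopA, ha2, hm2, he2, ih, pvKeep]

-- before the flag is set, A's loop computes B's two-phase result
lemma pvLoopA_false (ls : List String) :
    pvLoopA ls false = pvAltCore ls := by
  induction ls with
  | nil => simp [pvLoopA, pvAltCore, pvStop]
  | cons l ls ih =>
    by_cases ha : pvAtom l = true
    · have h := eq_of_beq ha
      have hm : pvMol l = false := by simp only [pvMol]; rw [h]; decide
      rw [core_cons_atom ls ha hm]
      simp [pvLoopA, h, pvLoopA_true]
    · by_cases hm : pvMol l = true
      · rw [core_cons_mol ls hm]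
        have h := eq_of_beq hm
        simp [pvLoopA, h]
      · rw [core_cons_other ls (eq_false_of_ne_true ha) (eq_false_of_ne_true hm)]
        have ha2 : PySem.Str.strip l ≠ "[ atomtypes ]" := by
          simpa [pvAtom] using eq_false_of_ne_true ha
        have hm2 : PySem.Str.strip l ≠ "[ moleculetype ]" := by
          simpa [pvMol] using eq_false_of_ne_true hm
        simp [pvLoopA, ha2, hm2, ih]

-- ===== VERDICT (by name: the statement is the Claim_ definition above) =====
theorem extract_atomtypes_spec : Claim_equal_extract_atomtypes := by
  intro p ls _
  show extract_atomtypes p ls = extract_atomtypes_alt p ls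
  rw [extract_atomtypes, pvLoopA_false, alt_def]
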